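-- pv_equiv track=rewrite | github.com/muhammadazzazy/febrilogic | app/apis/tools/afi_model.py | label_matches
-- ===== SOURCE A (Python) =====
-- def label_matches(true_label: str, predicted: str) -> bool:
--     """Returns True if ground-truth label matches a model disease string (lowercase names)."""
--     tl: str = (true_label or '').strip().lower()
--     pl: str = (predicted or '').strip().lower()
--     if not tl or not pl:
--         return False
--     if tl == pl:
--         return True
--     synonym_groups = (
--         frozenset({'typhoid', 'enteric fever'}),
--         frozenset({'spotted fever group', 'spotted fever'}),
--         frozenset({'dengue fever', 'dengue fever severe',
--                   'dengue fever non-severe'}),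
--         frozenset({'yellow fever', 'yellow fever severe',
--                   'yellow fever non-severe'}),
--     )
--     for g in synonym_groups:
--         if tl in g and pl in g:
--             return True
--     return False
-- ===== SOURCE B (Python) =====
-- _SYN_GROUP = {}
-- for _i, _g in enumerate((
--     ('typhoid', 'enteric fever'),
--     ('spotted fever group', 'spotted fever'),
--     ('dengue fever', 'dengue fever severe', 'dengue fever non-severe'),
--     ('yellow fever', 'yellow fever severe', 'yellow fever non-severe'),
-- )):
--     for _name in _g:
--         _SYN_GROUP[_name] = _i
--
--
-- def label_matches(true_label: str, predicted: str) -> bool: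
--     """Returns True if ground-truth label matches a model disease string (lowercase names)."""
--     tl = (true_label or '').strip().lower()
--     pl = (predicted or '').strip().lower()
--     if not tl or not pl:
--         return False
--     if tl == pl:
--         return True
--     gi = _SYN_GROUP.get(tl)
--     return gi is not None and gi == _SYN_GROUP.get(pl)
-- ===== Notes on version B (the rewrite author's own statement) =====
-- stated objective: simpler
-- what changed: Replaces the per-call loop over synonym groups with a module-level dict mapping each synonym to its group id; after the equality check, two O(1) lookups and an id comparison decide the match.
import Mathlib
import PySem

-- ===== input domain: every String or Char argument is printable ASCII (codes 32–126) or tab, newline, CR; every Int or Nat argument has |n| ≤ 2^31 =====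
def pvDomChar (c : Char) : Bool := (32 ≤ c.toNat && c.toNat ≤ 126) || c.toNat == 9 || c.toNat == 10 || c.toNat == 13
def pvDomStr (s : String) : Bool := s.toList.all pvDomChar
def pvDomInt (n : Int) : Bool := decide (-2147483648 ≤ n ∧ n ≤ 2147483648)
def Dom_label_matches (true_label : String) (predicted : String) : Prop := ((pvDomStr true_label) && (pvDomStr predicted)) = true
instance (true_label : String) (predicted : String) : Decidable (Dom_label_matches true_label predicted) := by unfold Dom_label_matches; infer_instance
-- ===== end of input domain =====

-- B replaces A's per-call scan over the synonym groups by a precomputed synonym→group-id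
-- dictionary and two lookups (objective: simpler/flatter control flow).

-- ===== PORT A =====
-- the tuple of frozensets A scans (set membership does not depend on order)
def pvGroups : List (List String) :=
  [["typhoid", "enteric fever"],
   ["spotted fever group", "spotted fever"],
   ["dengue fever", "dengue fever severe", "dengue fever non-severe"],
   ["yellow fever", "yellow fever severe", "yellow fever non-severe"]]

def label_matches (true_label : String) (predicted : String) : Bool :=
  -- (x or '') is the identity on strings up to the later emptiness test
  let tl := PySem.Str.lower (PySem.Str.strip true_label)
  let pl := PySem.Str.lower (PySem.Str.strip predicted)
  if tl == "" || pl == "" then false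
  else if tl == pl then true
  else
    -- for g in synonym_groups: if tl in g and pl in g: return True / return False
    pvGroups.any (fun g => g.contains tl && g.contains pl)

-- ===== PORT B =====
-- the module-level dict built by Source B's enumerate loop (insertion order, unique keys)
def pvSynMap : PySem.Dict String Int :=
  PySem.Dict.mk
    [("typhoid", 0), ("enteric fever", 0),
     ("spotted fever group", 1), ("spotted fever", 1),
     ("dengue fever", 2), ("dengue fever severe", 2), ("dengue fever non-severe", 2),
     ("yellow fever", 3), ("yellow fever severe", 3), ("yellow fever non-severe", 3)]

def label_matches_alt (true_label : String) (predicted : String) : Bool :=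
  let tl := PySem.Str.lower (PySem.Str.strip true_label)
  let pl := PySem.Str.lower (PySem.Str.strip predicted)
  if tl == "" || pl == "" then false
  else if tl == pl then true
  else
    match PySem.Dict.get? pvSynMap tl with
    | none => false
    | some gi => PySem.Dict.get? pvSynMap pl == some gi

-- ===== PRECONDITION & SPEC =====
def Spec_label_matches (true_label : String) (predicted : String) (out : Bool) : Prop := out = label_matches_alt true_label predicted
instance (true_label : String) (predicted : String) (out : Bool) : Decidable (Spec_label_matches true_label predicted out) := by unfold Spec_label_matches; infer_instance

-- ===== CLAIM (what is proved, stated in full; the proofs are below) =====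
def Claim_equal_label_matches : Prop := ∀ (true_label : String) (predicted : String), Dom_label_matches true_label predicted → Spec_label_matches true_label predicted (label_matches true_label predicted)

-- ===== LEMMAS AND PROOFS =====

-- group 0 membership corresponds to group id 0
theorem pv_g0 (s : String) :
    (["typhoid", "enteric fever"] : List String).contains s
      = (PySem.Dict.get? pvSynMap s == some 0) := by
  by_cases h1 : s = "typhoid"; · subst h1; decide
  by_cases h2 : s = "enteric fever"; · subst h2; decide
  by_cases h3 : s = "spotted fever group"; · subst h3; decide
  by_cases h4 : s = "spotted fever"; · subst h4; decide
  by_cases h5 : s = "dengue fever"; · subst h5; decide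
  by_cases h6 : s = "dengue fever severe"; · subst h6; decide
  by_cases h7 : s = "dengue fever non-severe"; · subst h7; decide
  by_cases h8 : s = "yellow fever"; · subst h8; decide
  by_cases h9 : s = "yellow fever severe"; · subst h9; decide
  by_cases h10 : s = "yellow fever non-severe"; · subst h10; decide
  simp [pvSynMap, h1, h2, h3, h4, h5, h6, h7, h8, h9, h10,
        Ne.symm, PySem.Dict.get?]

theorem pv_g1 (s : String) :
    (["spotted fever group", "spotted fever"] : List String).contains s
      = (PySem.Dict.get? pvSynMap s == some 1) := by
  by_cases h1 : s = "typhoid"; · subst h1; decide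
  by_cases h2 : s = "enteric fever"; · subst h2; decide
  by_cases h3 : s = "spotted fever group"; · subst h3; decide
  by_cases h4 : s = "spotted fever"; · subst h4; decide
  by_cases h5 : s = "dengue fever"; · subst h5; decide
  by_cases h6 : s = "dengue fever severe"; · subst h6; decide
  by_cases h7 : s = "dengue fever non-severe"; · subst h7; decide
  by_cases h8 : s = "yellow fever"; · subst h8; decide
  by_cases h9 : s = "yellow fever severe"; · subst h9; decide
  by_cases h10 : s = "yellow fever non-severe"; · subst h10; decide
  simp [pvSynMap, h1, h2, h3, h4, h5, h6, h7, h8, h9, h10,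
        Ne.symm, PySem.Dict.get?]

theorem pv_g2 (s : String) :
    (["dengue fever", "dengue fever severe", "dengue fever non-severe"] : List String).contains s
      = (PySem.Dict.get? pvSynMap s == some 2) := by
  by_cases h1 : s = "typhoid"; · subst h1; decide
  by_cases h2 : s = "enteric fever"; · subst h2; decide
  by_cases h3 : s = "spotted fever group"; · subst h3; decide
  by_cases h4 : s = "spotted fever"; · subst h4; decide
  by_cases h5 : s = "dengue fever"; · subst h5; decide
  by_cases h6 : s = "dengue fever severe"; · subst h6; decide
  by_cases h7 : s = "dengue fever non-severe"; · subst h7; decide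
  by_cases h8 : s = "yellow fever"; · subst h8; decide
  by_cases h9 : s = "yellow fever severe"; · subst h9; decide
  by_cases h10 : s = "yellow fever non-severe"; · subst h10; decide
  simp [pvSynMap, h1, h2, h3, h4, h5, h6, h7, h8, h9, h10,
        Ne.symm, PySem.Dict.get?]

theorem pv_g3 (s : String) :
    (["yellow fever", "yellow fever severe", "yellow fever non-severe"] : List String).contains s
      = (PySem.Dict.get? pvSynMap s == some 3) := by
  by_cases h1 : s = "typhoid"; · subst h1; decide
  by_cases h2 : s = "enteric fever"; · subst h2; decide
  by_cases h3 : s = "spotted fever group"; · subst h3; decide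
  by_cases h4 : s = "spotted fever"; · subst h4; decide
  by_cases h5 : s = "dengue fever"; · subst h5; decide
  by_cases h6 : s = "dengue fever severe"; · subst h6; decide
  by_cases h7 : s = "dengue fever non-severe"; · subst h7; decide
  by_cases h8 : s = "yellow fever"; · subst h8; decide
  by_cases h9 : s = "yellow fever severe"; · subst h9; decide
  by_cases h10 : s = "yellow fever non-severe"; · subst h10; decide
  simp [pvSynMap, h1, h2, h3, h4, h5, h6, h7, h8, h9, h10,
        Ne.symm, PySem.Dict.get?]

-- the group scan of A equals the two-lookup comparison of B, for arbitrary strings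
theorem pv_core (s t : String) :
    (pvGroups.any (fun g => g.contains s && g.contains t))
      = (match PySem.Dict.get? pvSynMap s with
         | none => false
         | some gi => PySem.Dict.get? pvSynMap t == some gi) := by
  by_cases h1 : s = "typhoid"
  · subst h1
    rw [show PySem.Dict.get? pvSynMap "typhoid" = some 0 from by decide]
    simpa [pvGroups] using pv_g0 t
  by_cases h2 : s = "enteric fever"
  · subst h2
    rw [show PySem.Dict.get? pvSynMap "enteric fever" = some 0 from by decide]
    simpa [pvGroups] using pv_g0 t
  by_cases h3 : s = "spotted fever group"
  · subst h3
    rw [show PySem.Dict.get? pvSynMap "spotted fever group" = some 1 from by decide]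
    simpa [pvGroups] using pv_g1 t
  by_cases h4 : s = "spotted fever"
  · subst h4
    rw [show PySem.Dict.get? pvSynMap "spotted fever" = some 1 from by decide]
    simpa [pvGroups] using pv_g1 t
  by_cases h5 : s = "dengue fever"
  · subst h5
    rw [show PySem.Dict.get? pvSynMap "dengue fever" = some 2 from by decide]
    simpa [pvGroups] using pv_g2 t
  by_cases h6 : s = "dengue fever severe"
  · subst h6
    rw [show PySem.Dict.get? pvSynMap "dengue fever severe" = some 2 from by decide]
    simpa [pvGroups] using pv_g2 t
  by_cases h7 : s = "dengue fever non-severe"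
  · subst h7
    rw [show PySem.Dict.get? pvSynMap "dengue fever non-severe" = some 2 from by decide]
    simpa [pvGroups] using pv_g2 t
  by_cases h8 : s = "yellow fever"
  · subst h8
    rw [show PySem.Dict.get? pvSynMap "yellow fever" = some 3 from by decide]
    simpa [pvGroups] using pv_g3 t
  by_cases h9 : s = "yellow fever severe"
  · subst h9
    rw [show PySem.Dict.get? pvSynMap "yellow fever severe" = some 3 from by decide]
    simpa [pvGroups] using pv_g3 t
  by_cases h10 : s = "yellow fever non-severe"
  · subst h10
    rw [show PySem.Dict.get? pvSynMap "yellow fever non-severe" = some 3 from by decide]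
    simpa [pvGroups] using pv_g3 t
  have hnone : PySem.Dict.get? pvSynMap s = none := by
    simp [pvSynMap, PySem.Dict.get?, h1, h2, h3, h4, h5, h6, h7, h8, h9, h10, Ne.symm]
  rw [hnone]
  simp [pvGroups, h1, h2, h3, h4, h5, h6, h7, h8, h9, h10]

-- ===== VERDICT (by name: the statement is the Claim_ definition above) =====
theorem label_matches_spec : Claim_equal_label_matches := by
  intro true_label predicted _
  unfold Spec_label_matches label_matches label_matches_alt
  set s := PySem.Str.lower (PySem.Str.strip true_label) with hs
  set t := PySem.Str.lower (PySem.Str.strip predicted) with ht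
  simp only []
  split_ifs
  · rfl
  · rfl
  · exact pv_core s t
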